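-- pv_equiv track=rewrite | github.com/HodzaArmen/P1 | ZemljevidOvir/ZemljevidOvir.py | huligani
-- ===== SOURCE A (Python) =====
-- def pretvori_vrstico(vrstica):
--     ovire = []
--     trenutnaOvira = None
--     index = 1
--     for znak in vrstica:
--         if znak == "#":
--             if trenutnaOvira is None:
--                 trenutnaOvira = (index, index)
--             else:
--                 trenutnaOvira = (trenutnaOvira[0], index)
--         else:
--             if trenutnaOvira is not None:
--                 ovire.append(trenutnaOvira)
--                 trenutnaOvira = None
--         index += 1
--     if trenutnaOvira is not None:
--         ovire.append(trenutnaOvira)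
--     return ovire
--
-- def pretvori_zemljevid(vrstice):
--     ovire = []
--     y = 1
--     for vrstica in vrstice:
--         for x0, x1 in pretvori_vrstico(vrstica):
--             ovire.append((x0, x1, y))
--         y += 1
--     return sorted(ovire, key=lambda x: (x[2], x[0])) #sortirano po vrsticah in stolpcih
--
-- def izboljsave(prej, potem):
--     pretvoriPrej = pretvori_zemljevid(prej) #pretvorimo v seznam trojk
--     pretvoriPotem = pretvori_zemljevid(potem) #pretvorimo v seznam trojk
--     noveOvire = []
--     for nova_ovira in pretvoriPotem: #zanka skozi sezname trojk potem
--         if nova_ovira not in pretvoriPrej: #če sezname trojk potem ni v seznamih trojk prej, potem je to nova ovira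
--             noveOvire.append(nova_ovira)
--     return sorted(noveOvire, key=lambda x: (x[2], x[0])) #sortirano po vrsticah in stolpcih
--
-- def huligani(prej, potem):
--     noveOvire = izboljsave(prej, potem)
--     odstranjeneOvire = []
--     pretvoriPrej = pretvori_zemljevid(prej)
--     pretvoriPotem = pretvori_zemljevid(potem)
--     for oviraPrej in pretvoriPrej: #zanka skozi sezname trojk potem
--         if oviraPrej not in pretvoriPotem: #če sezname trojk prej ni v seznamih trojk potem, potem je to odstranjena ovira
--             odstranjeneOvire.append(oviraPrej)
--     return (sorted(noveOvire, key=lambda x: (x[2], x[0])), sorted(odstranjeneOvire, key=lambda x: (x[2], x[0]))) #vrnemo sortirano po vrsticah in stolpcih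
-- ===== SOURCE B (Python) =====
-- def _odseki(vrstica):
--     odseki = []
--     x = 0
--     n = len(vrstica)
--     while x < n:
--         if vrstica[x] == "#":
--             zacetek = x
--             while x < n and vrstica[x] == "#":
--                 x += 1
--             odseki.append((zacetek + 1, x))
--         else:
--             x += 1
--     return odseki
--
-- def _razlika(p, q):
--     # two-pointer merge of two strictly increasing segment lists:
--     # returns (elements only in p, elements only in q)
--     samo_p = []
--     samo_q = []
--     i = j = 0
--     while i < len(p) and j < len(q):
--         if p[i] == q[j]:
--             i += 1
--             j += 1
--         elif p[i] < q[j]: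
--             samo_p.append(p[i])
--             i += 1
--         else:
--             samo_q.append(q[j])
--             j += 1
--     samo_p.extend(p[i:])
--     samo_q.extend(q[j:])
--     return samo_p, samo_q
--
-- def huligani(prej, potem):
--     dodane = []
--     odstranjene = []
--     n = max(len(prej), len(potem))
--     for y in range(n):
--         rp = prej[y] if y < len(prej) else ""
--         rq = potem[y] if y < len(potem) else ""
--         if rp == rq:
--             continue
--         samo_p, samo_q = _razlika(_odseki(rp), _odseki(rq))
--         dodane.extend((x0, x1, y + 1) for x0, x1 in samo_q)
--         odstranjene.extend((x0, x1, y + 1) for x0, x1 in samo_p)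
--     return (dodane, odstranjene)
-- ===== Notes on version B (the rewrite author's own statement) =====
-- stated objective: faster
-- what changed: B replaces A's pipeline (build all triples for both maps, quadratic 'not in'-list difference scans, three sorts) by a single merge-join pass: rows are compared pairwise, identical rows are skipped without parsing, each differing row's segment lists are diffed with a two-pointer merge, and results are emitted already in (row, column) order so no sort or membership scan is needed.
import Mathlib
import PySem

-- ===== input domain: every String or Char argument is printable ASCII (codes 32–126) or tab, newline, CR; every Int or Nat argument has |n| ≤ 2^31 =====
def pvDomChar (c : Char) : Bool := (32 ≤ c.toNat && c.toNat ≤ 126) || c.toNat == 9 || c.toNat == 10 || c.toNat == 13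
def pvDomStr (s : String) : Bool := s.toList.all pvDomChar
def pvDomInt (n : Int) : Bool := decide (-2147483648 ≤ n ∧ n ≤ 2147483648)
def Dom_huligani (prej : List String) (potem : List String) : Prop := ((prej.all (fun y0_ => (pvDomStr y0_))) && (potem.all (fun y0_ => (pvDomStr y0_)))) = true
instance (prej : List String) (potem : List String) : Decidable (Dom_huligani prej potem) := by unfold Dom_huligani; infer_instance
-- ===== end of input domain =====

-- B replaces A's global build-everything-then-quadratic-membership-then-sort pipeline by a
-- single merge-join pass: rows are compared pairwise (identical rows are skipped without
-- parsing), each differing row's segment lists are diffed by a two-pointer merge, and the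
-- outputs are emitted already in (row, column) order, so no sorting and no membership scans.

-- ===== PORT A =====
def pvStepA (st : List (Int × Int) × Option (Int × Int) × Int) (znak : Char) :
    List (Int × Int) × Option (Int × Int) × Int :=
  if znak = '#' then
    match st.2.1 with
    | none => (st.1, some (st.2.2, st.2.2), st.2.2 + 1)
    | some c => (st.1, some (c.1, st.2.2), st.2.2 + 1)
  else
    match st.2.1 with
    | some c => (st.1 ++ [c], none, st.2.2 + 1)
    | none => (st.1, none, st.2.2 + 1)

def pretvoriVrstico (vrstica : String) : List (Int × Int) :=
  let st := vrstica.toList.foldl pvStepA ([], none, 1)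
  match st.2.1 with
  | some c => st.1 ++ [c]
  | none => st.1

def pretvoriZemljevid (vrstice : List String) : List (Int × Int × Int) :=
  let st := vrstice.foldl (fun (st : List (Int × Int × Int) × Int) vrstica =>
    ((pretvoriVrstico vrstica).foldl (fun acc p => acc ++ [(p.1, p.2, st.2)]) st.1, st.2 + 1)) ([], 1)
  PySem.List.sorted2 st.1 (fun x => x.2.2) (fun x => x.1)

def izboljsave (prej : List String) (potem : List String) : List (Int × Int × Int) :=
  let pretvoriPrej := pretvoriZemljevid prej
  let pretvoriPotem := pretvoriZemljevid potem
  let noveOvire := pretvoriPotem.foldl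
    (fun acc t => if t ∈ pretvoriPrej then acc else acc ++ [t]) []
  PySem.List.sorted2 noveOvire (fun x => x.2.2) (fun x => x.1)

def huligani (prej : List String) (potem : List String) :
    (List (Int × Int × Int)) × (List (Int × Int × Int)) :=
  let noveOvire := izboljsave prej potem
  let pretvoriPrej := pretvoriZemljevid prej
  let pretvoriPotem := pretvoriZemljevid potem
  let odstranjeneOvire := pretvoriPrej.foldl
    (fun acc t => if t ∈ pretvoriPotem then acc else acc ++ [t]) []
  (PySem.List.sorted2 noveOvire (fun x => x.2.2) (fun x => x.1),
   PySem.List.sorted2 odstranjeneOvire (fun x => x.2.2) (fun x => x.1))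

-- ===== PORT B =====
-- run scanner of one row; x = 0-based index of the head of the remaining chars
def altRuns : List Char → Int → List (Int × Int)
  | [], _ => []
  | c :: rest, x =>
    if c = '#' then
      let n := (rest.takeWhile (· = '#')).length
      (x + 1, x + 1 + n) :: altRuns (rest.drop n) (x + 1 + n)
    else
      altRuns rest (x + 1)
termination_by cs _ => cs.length
decreasing_by
  · have := (List.takeWhile_sublist (p := (· = '#')) (l := rest)).length_le
    simp only [List.length_drop, List.length_cons]; omega
  · simp

-- two-pointer merge of two strictly increasing segment lists: (only-in-p, only-in-q)
def altMerge : List (Int × Int) → List (Int × Int) → List (Int × Int) × List (Int × Int)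
  | [], q => ([], q)
  | a :: ps, [] => (a :: ps, [])
  | a :: ps, b :: qs =>
    if a = b then altMerge ps qs
    else if a.1 < b.1 ∨ (a.1 = b.1 ∧ a.2 < b.2) then
      let r := altMerge ps (b :: qs)
      (a :: r.1, r.2)
    else
      let r := altMerge (a :: ps) qs
      (r.1, b :: r.2)

def huligani_alt (prej : List String) (potem : List String) :
    (List (Int × Int × Int)) × (List (Int × Int × Int)) :=
  let n := max prej.length potem.length
  (List.range n).foldl (fun (st : List (Int × Int × Int) × List (Int × Int × Int)) y =>
    let rp := prej.getD y ""
    let rq := potem.getD y ""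
    if rp = rq then st
    else
      let d := altMerge (altRuns rp.toList 0) (altRuns rq.toList 0)
      (st.1 ++ d.2.map (fun p => (p.1, p.2, (y : Int) + 1)),
       st.2 ++ d.1.map (fun p => (p.1, p.2, (y : Int) + 1)))) ([], [])

-- ===== PRECONDITION & SPEC =====
def Spec_huligani (prej : List String) (potem : List String) (out : (List (Int × Int × Int)) × (List (Int × Int × Int))) : Prop := out = huligani_alt prej potem
instance (prej : List String) (potem : List String) (out : (List (Int × Int × Int)) × (List (Int × Int × Int))) : Decidable (Spec_huligani prej potem out) := by unfold Spec_huligani; infer_instance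

-- ===== CLAIM (what is proved, stated in full; the proofs are below) =====
def Claim_equal_huligani : Prop := ∀ (prej : List String) (potem : List String), Dom_huligani prej potem → Spec_huligani prej potem (huligani prej potem)

-- ===== LEMMAS AND PROOFS =====

-- the (row, start)-lexicographic order the Python sorts by
def pvLex (a b : Int × Int × Int) : Prop :=
  a.2.2 < b.2.2 ∨ (a.2.2 = b.2.2 ∧ a.1 < b.1)

-- strict lexicographic order on segments (Python tuple <)
def pvLt (a b : Int × Int) : Prop := a.1 < b.1 ∨ (a.1 = b.1 ∧ a.2 < b.2)

-- two-state run recursion used as common spec of both parsers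
mutual
def pvRunsP : List Char → Int → List (Int × Int)
  | [], _ => []
  | c :: r, x => if c = '#' then pvRunsC r (x + 1) (x + 1) else pvRunsP r (x + 1)
def pvRunsC : List Char → Int → Int → List (Int × Int)
  | [], s, e => [(s, e)]
  | c :: r, s, e => if c = '#' then pvRunsC r s (e + 1) else (s, e) :: pvRunsP r (e + 1)
end

def pvCloseA (st : List (Int × Int) × Option (Int × Int) × Int) : List (Int × Int) :=
  match st.2.1 with
  | some c => st.1 ++ [c]
  | none => st.1

lemma pvFoldA (cs : List Char) :
    (∀ acc x, pvCloseA (cs.foldl pvStepA (acc, none, x + 1)) = acc ++ pvRunsP cs x) ∧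
    (∀ acc s e, pvCloseA (cs.foldl pvStepA (acc, some (s, e), e + 1)) = acc ++ pvRunsC cs s e) := by
  induction cs with
  | nil =>
    exact ⟨fun acc x => by simp [pvCloseA, pvRunsP],
           fun acc s e => by simp [pvCloseA, pvRunsC]⟩
  | cons c rest ih =>
    constructor
    · intro acc x
      by_cases hc : c = '#'
      · simp only [List.foldl_cons, pvStepA, hc, pvRunsP]
        have := ih.2 acc (x + 1) (x + 1)
        simpa [hc] using this
      · simp only [List.foldl_cons, pvStepA, hc, pvRunsP]
        have := ih.1 acc (x + 1)
        simpa [hc] using this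
    · intro acc s e
      by_cases hc : c = '#'
      · simp only [List.foldl_cons, pvStepA, hc, pvRunsC]
        have := ih.2 acc s (e + 1)
        simpa [hc] using this
      · simp only [List.foldl_cons, pvStepA, if_neg hc, pvRunsC]
        have := ih.1 (acc ++ [(s, e)]) (e + 1)
        simp at this ⊢
        rw [this]

lemma pvVrstico (s : String) : pretvoriVrstico s = pvRunsP s.toList 0 := by
  have := (pvFoldA s.toList).1 [] 0
  simpa [pretvoriVrstico, pvCloseA] using this

lemma pvRunsC_run (cs : List Char) (s e : Int) :
    pvRunsC cs s e =
      (s, e + ((cs.takeWhile (· = '#')).length : Int)) ::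
        pvRunsP (cs.drop ((cs.takeWhile (· = '#')).length)) (e + ((cs.takeWhile (· = '#')).length : Int)) := by
  induction cs generalizing s e with
  | nil => simp [pvRunsC, pvRunsP]
  | cons c r ih =>
    by_cases hc : c = '#'
    · rw [pvRunsC, if_pos hc]
      rw [ih s (e + 1)]
      simp [hc]
      constructor
      · ring
      · congr 1; ring
    · rw [pvRunsC, if_neg hc]
      simp [hc]
      conv_rhs => rw [pvRunsP]
      rw [if_neg hc]

lemma pvAltRuns_eq (cs : List Char) (x : Int) :
    altRuns cs x = pvRunsP cs x := by
  induction cs, x using altRuns.induct with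
  | case1 x => simp [altRuns, pvRunsP]
  | case2 rest x n ih =>
    rw [altRuns, pvRunsP, if_pos rfl, if_pos rfl, pvRunsC_run]
    exact congrArg (List.cons _) ih
  | case3 c rest x hc ih =>
    rw [altRuns, if_neg hc, pvRunsP, if_neg hc, ih]

lemma pvRuns_ord (cs : List Char) :
    (∀ x, (pvRunsP cs x).Pairwise (fun a b => a.1 < b.1) ∧ ∀ p ∈ pvRunsP cs x, x < p.1) ∧
    (∀ s e, s ≤ e → (pvRunsC cs s e).Pairwise (fun a b => a.1 < b.1) ∧ ∀ p ∈ pvRunsC cs s e, s ≤ p.1) := by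
  induction cs with
  | nil =>
    refine ⟨fun x => by simp [pvRunsP], fun s e hse => by simp [pvRunsC]⟩
  | cons c r ih =>
    by_cases hc : c = '#'
    · refine ⟨fun x => ?_, fun s e hse => ?_⟩
      · rw [pvRunsP, if_pos hc]
        obtain ⟨hp, hm⟩ := ih.2 (x + 1) (x + 1) le_rfl
        exact ⟨hp, fun p hp' => by have := hm p hp'; omega⟩
      · rw [pvRunsC, if_pos hc]
        obtain ⟨hp, hm⟩ := ih.2 s (e + 1) (by omega)
        exact ⟨hp, hm⟩
    · refine ⟨fun x => ?_, fun s e hse => ?_⟩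
      · rw [pvRunsP, if_neg hc]
        obtain ⟨hp, hm⟩ := ih.1 (x + 1)
        exact ⟨hp, fun p hp' => by have := hm p hp'; omega⟩
      · rw [pvRunsC, if_neg hc]
        obtain ⟨hp, hm⟩ := ih.1 (e + 1)
        refine ⟨List.pairwise_cons.mpr ⟨fun p hp' => ?_, hp⟩, ?_⟩
        · have := hm p hp'; simp; omega
        · intro p hp'
          rcases List.mem_cons.mp hp' with h | h
          · subst h; simp
          · have := hm p h; omega

lemma pvRuns_lt (cs : List Char) : (pvRunsP cs 0).Pairwise pvLt :=
  ((pvRuns_ord cs).1 0).1.imp (fun h => Or.inl h)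

-- tagging a list of segments with a row number
def pvTag (y : Int) (ps : List (Int × Int)) : List (Int × Int × Int) :=
  ps.map (fun p => (p.1, p.2, y))

-- triples of all rows, starting at row number y
def pvFrom : List String → Int → List (Int × Int × Int)
  | [], _ => []
  | v :: rs, y => pvTag y (pvRunsP v.toList 0) ++ pvFrom rs (y + 1)

lemma pvMem_tag (y : Int) (ps : List (Int × Int)) (t : Int × Int × Int) :
    t ∈ pvTag y ps ↔ t.2.2 = y ∧ (t.1, t.2.1) ∈ ps := by
  obtain ⟨a, b, c⟩ := t
  simp only [pvTag, List.mem_map, Prod.mk.injEq]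
  constructor
  · rintro ⟨p, hp, rfl, rfl, rfl⟩; exact ⟨rfl, hp⟩
  · rintro ⟨rfl, hp⟩; exact ⟨(a, b), hp, rfl, rfl, rfl⟩

lemma pvTag_pairwise (y : Int) (cs : List Char) : (pvTag y (pvRunsP cs 0)).Pairwise pvLex := by
  unfold pvTag
  rw [List.pairwise_map]
  exact ((pvRuns_ord cs).1 0).1.imp (fun h => Or.inr ⟨rfl, h⟩)

lemma pvFrom_pairwise (rows : List String) (y : Int) :
    (pvFrom rows y).Pairwise pvLex ∧ ∀ p ∈ pvFrom rows y, y ≤ p.2.2 := by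
  induction rows generalizing y with
  | nil => simp [pvFrom]
  | cons v rs ih =>
    obtain ⟨ihp, ihm⟩ := ih (y + 1)
    constructor
    · rw [pvFrom, List.pairwise_append]
      refine ⟨pvTag_pairwise y v.toList, ihp, fun a ha b hb => ?_⟩
      have h1 := (pvMem_tag y _ a).mp ha
      have h2 := ihm b hb
      exact Or.inl (by omega)
    · intro p hp
      rcases List.mem_append.mp hp with h | h
      · have := (pvMem_tag y _ p).mp h; omega
      · have := ihm p h; omega

-- flatMap congruence helper
lemma pvFlatMap_congr {α β : Type} (l : List α) (f g : α → List β)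
    (h : ∀ x ∈ l, f x = g x) : l.flatMap f = l.flatMap g := by
  induction l with
  | nil => rfl
  | cons a l ih =>
    simp only [List.flatMap_cons]
    rw [h a (List.mem_cons_self), ih (fun x hx => h x (List.mem_cons_of_mem a hx))]

lemma pvFrom_range (rows : List String) (y : Int) :
    pvFrom rows y =
      (List.range rows.length).flatMap
        (fun (k : Nat) => pvTag (y + (k : Int)) (pvRunsP (rows.getD k "").toList 0)) := by
  induction rows generalizing y with
  | nil => simp [pvFrom]
  | cons v rs ih =>
    rw [pvFrom, ih (y + 1)]
    rw [List.length_cons, List.range_succ_eq_map, List.flatMap_cons, List.flatMap_map]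
    congr 1
    · simp [pvTag]
    · apply pvFlatMap_congr
      intro k _
      have h1 : (rs.getD k "") = ((v :: rs).getD (k + 1) "") := by simp [List.getD]
      have h2 : y + 1 + (k : Int) = y + ((k : Nat) + 1 : Nat) := by push_cast; ring
      rw [h2, h1]

lemma pvMem_from (rows : List String) (y : Nat) (t : Int × Int × Int)
    (ht : t.2.2 = (y : Int) + 1) :
    t ∈ pvFrom rows 1 ↔ (t.1, t.2.1) ∈ pvRunsP (rows.getD y "").toList 0 := by
  rw [pvFrom_range, List.mem_flatMap]
  constructor
  · rintro ⟨k, hk, hmem⟩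
    obtain ⟨h1, h2⟩ := (pvMem_tag _ _ _).mp hmem
    have : k = y := by omega
    subst this
    exact h2
  · intro h
    by_cases hy : y < rows.length
    · exact ⟨y, List.mem_range.mpr hy, (pvMem_tag _ _ _).mpr ⟨by omega, h⟩⟩
    · exfalso
      have : rows.getD y "" = "" := List.getD_eq_default _ _ (by omega)
      rw [this] at h
      simp [pvRunsP] at h

-- merge lemma: on strictly increasing lists, the two-pointer merge computes both difference filters
lemma pvMerge_filter (p q : List (Int × Int)) (hp : p.Pairwise pvLt) (hq : q.Pairwise pvLt) :
    altMerge p q = (p.filter (fun a => !decide (a ∈ q)), q.filter (fun b => !decide (b ∈ p))) := by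
  induction p, q using altMerge.induct with
  | case1 q => simp [altMerge]
  | case2 a ps => simp [altMerge]
  | case3 ps b qs ih =>
    rw [altMerge, if_pos rfl]
    have hp' := List.pairwise_cons.mp hp
    have hq' := List.pairwise_cons.mp hq
    rw [ih hp'.2 hq'.2]
    have hps : ps.filter (fun x => !decide (x = b ∨ x ∈ qs)) = ps.filter (fun x => !decide (x ∈ qs)) := by
      apply List.filter_congr
      intro x hx
      have hax : pvLt b x := hp'.1 x hx
      have : x ≠ b := by
        intro h; subst h
        rcases hax with h | ⟨h1, h2⟩ <;> omega
      simp [this]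
    have hqs : qs.filter (fun x => !decide (x = b ∨ x ∈ ps)) = qs.filter (fun x => !decide (x ∈ ps)) := by
      apply List.filter_congr
      intro x hx
      have hax : pvLt b x := hq'.1 x hx
      have : x ≠ b := by
        intro h; subst h
        rcases hax with h | ⟨h1, h2⟩ <;> omega
      simp [this]
    simp only [List.filter_cons, List.mem_cons, true_or, decide_true, Bool.not_true,
      Bool.false_eq_true, if_false]
    rw [hps, hqs]
  | case4 a ps b qs hne hlt ih =>
    rw [altMerge, if_neg hne, if_pos hlt]
    have hp' := List.pairwise_cons.mp hp
    have hq' := List.pairwise_cons.mp hq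
    rw [ih hp'.2 hq]
    have hanq : a ∉ b :: qs := by
      intro h
      rcases List.mem_cons.mp h with h | h
      · exact hne h
      · have := hq'.1 a h
        rcases hlt with h1 | ⟨h1, h2⟩ <;> rcases this with h3 | ⟨h3, h4⟩ <;> omega
    have hqs : (b :: qs).filter (fun x => !decide (x ∈ a :: ps)) =
        (b :: qs).filter (fun x => !decide (x ∈ ps)) := by
      apply List.filter_congr
      intro x hx
      have : x ≠ a := by
        intro h; subst h
        rcases List.mem_cons.mp hx with h | h
        · exact hne h
        · have := hq'.1 x h
          rcases hlt with h1 | ⟨h1, h2⟩ <;> rcases this with h3 | ⟨h3, h4⟩ <;> omega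
      simp [List.mem_cons, this]
    rw [hqs]
    simp only [List.filter_cons, hanq, decide_false, Bool.not_false]
    simp
  | case5 a ps b qs hne hnlt ih =>
    rw [altMerge, if_neg hne, if_neg hnlt]
    have hp' := List.pairwise_cons.mp hp
    have hq' := List.pairwise_cons.mp hq
    rw [ih hp hq'.2]
    have hbt : pvLt b a := by
      rcases lt_trichotomy a.1 b.1 with h | h | h
      · exact absurd (Or.inl h) hnlt
      · rcases lt_trichotomy a.2 b.2 with h2 | h2 | h2
        · exact absurd (Or.inr ⟨h, h2⟩) hnlt
        · exact absurd (Prod.ext h h2) hne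
        · exact Or.inr ⟨h.symm, h2⟩
      · exact Or.inl h
    have hbnp : b ∉ a :: ps := by
      intro h
      rcases List.mem_cons.mp h with h | h
      · exact (hne h.symm)
      · have := hp'.1 b h
        rcases hbt with h1 | ⟨h1, h2⟩ <;> rcases this with h3 | ⟨h3, h4⟩ <;> omega
    have hps : (a :: ps).filter (fun x => !decide (x ∈ b :: qs)) =
        (a :: ps).filter (fun x => !decide (x ∈ qs)) := by
      apply List.filter_congr
      intro x hx
      have : x ≠ b := by
        intro h; subst h
        rcases List.mem_cons.mp hx with h | h
        · exact hne h.symm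
        · have := hp'.1 x h
          rcases hbt with h1 | ⟨h1, h2⟩ <;> rcases this with h3 | ⟨h3, h4⟩ <;> omega
      simp [List.mem_cons, this]
    rw [hps]
    simp only [List.filter_cons, hbnp, decide_false, Bool.not_false]
    simp

-- skip-if fold = filter
lemma pvFoldl_skip_if {α : Type} (p : α → Bool) (l : List α) (init : List α) :
    l.foldl (fun acc t => if p t then acc else acc ++ [t]) init = init ++ l.filter (fun t => !(p t)) := by
  induction l generalizing init with
  | nil => simp
  | cons t l ih =>
    by_cases hp : p t
    · simp [hp, ih]
    · simp [hp, ih]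

lemma pvFoldl_insertBy_eq_self {α : Type} (before : α → α → Bool) (xs : List α)
    (h : xs.Pairwise (fun a b => before b a = false)) :
    xs.foldl (fun acc x => PySem.List.insertBy before x acc) [] = xs := by
  induction xs using List.reverseRecOn with
  | nil => rfl
  | append_singleton ys x ih =>
    rw [List.foldl_append, List.foldl_cons, List.foldl_nil]
    rw [ih (List.pairwise_append.mp h).1]
    exact PySem.List.insertBy_of_forall_not_before before x ys
      (fun y hy => (List.pairwise_append.mp h).2.2 y hy x (List.mem_singleton_self x))

lemma pvSorted2_eq_self (xs : List (Int × Int × Int)) (h : xs.Pairwise pvLex) :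
    PySem.List.sorted2 xs (fun x => x.2.2) (fun x => x.1) = xs := by
  apply pvFoldl_insertBy_eq_self
  refine h.imp (fun {a b} hab => ?_)
  rcases hab with h1 | ⟨h1, h2⟩
  · simp [h1, not_lt_of_gt h1]
  · simp [h1]
    omega

-- A's map builder computes pvFrom … 1 (already sorted)
lemma pvZemljevid (vrstice : List String) : pretvoriZemljevid vrstice = pvFrom vrstice 1 := by
  have hfold : ∀ (rows : List String) (acc : List (Int × Int × Int)) (y : Int),
      (rows.foldl (fun (st : List (Int × Int × Int) × Int) vrstica =>
        ((pretvoriVrstico vrstica).foldl (fun acc p => acc ++ [(p.1, p.2, st.2)]) st.1, st.2 + 1)) (acc, y)).1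
      = acc ++ pvFrom rows y := by
    intro rows
    induction rows with
    | nil => intro acc y; simp [pvFrom]
    | cons v rs ih =>
      intro acc y
      simp only [List.foldl_cons]
      rw [ih]
      rw [PySem.List.foldl_append_singleton_eq_map, pvVrstico]
      simp [pvFrom, pvTag]
  rw [pretvoriZemljevid]
  rw [hfold vrstice [] 1]
  simp only [List.nil_append]
  exact pvSorted2_eq_self _ (pvFrom_pairwise vrstice 1).1

-- fold appending two lists per step = pair of flatMaps
lemma pvFoldl_pair_append {α : Type} (f g : Nat → List α) (l : List Nat)
    (a b : List α) :
    l.foldl (fun (st : List α × List α) y => (st.1 ++ f y, st.2 ++ g y)) (a, b)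
      = (a ++ l.flatMap f, b ++ l.flatMap g) := by
  induction l generalizing a b with
  | nil => simp
  | cons y l ih => simp [ih]

-- the per-row contribution functions of B
def pvGAdd (prej potem : List String) (y : Nat) : List (Int × Int × Int) :=
  if prej.getD y "" = potem.getD y "" then []
  else pvTag ((y : Int) + 1)
    (altMerge (altRuns (prej.getD y "").toList 0) (altRuns (potem.getD y "").toList 0)).2

def pvGRem (prej potem : List String) (y : Nat) : List (Int × Int × Int) :=
  if prej.getD y "" = potem.getD y "" then []
  else pvTag ((y : Int) + 1)
    (altMerge (altRuns (prej.getD y "").toList 0) (altRuns (potem.getD y "").toList 0)).1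

lemma pvAlt_flatMap (prej potem : List String) :
    huligani_alt prej potem =
      ((List.range (max prej.length potem.length)).flatMap (pvGAdd prej potem),
       (List.range (max prej.length potem.length)).flatMap (pvGRem prej potem)) := by
  unfold huligani_alt
  have hstep : (fun (st : List (Int × Int × Int) × List (Int × Int × Int)) y =>
      let rp := prej.getD y ""
      let rq := potem.getD y ""
      if rp = rq then st
      else
        let d := altMerge (altRuns rp.toList 0) (altRuns rq.toList 0)
        (st.1 ++ d.2.map (fun p => (p.1, p.2, (y : Int) + 1)),
         st.2 ++ d.1.map (fun p => (p.1, p.2, (y : Int) + 1)))) =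
      (fun (st : List (Int × Int × Int) × List (Int × Int × Int)) y =>
        (st.1 ++ pvGAdd prej potem y, st.2 ++ pvGRem prej potem y)) := by
    funext st y
    simp only [pvGAdd, pvGRem, pvTag]
    split_ifs with h
    · simp
    · rfl
  rw [hstep, pvFoldl_pair_append]
  simp

-- one side of the global difference equals the flatMap of per-row merge diffs
lemma pvSide (ra rb : List String) (n : Nat) (hn : ra.length ≤ n) :
    (pvFrom ra 1).filter (fun t => !decide (t ∈ pvFrom rb 1)) =
      (List.range n).flatMap (fun (k : Nat) =>
        pvTag ((k : Int) + 1)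
          ((pvRunsP (ra.getD k "").toList 0).filter
            (fun p => !decide (p ∈ pvRunsP (rb.getD k "").toList 0)))) := by
  rw [pvFrom_range ra 1]
  rw [List.filter_flatMap]
  have hblk : ∀ k : Nat,
      (pvTag (1 + (k : Int)) (pvRunsP (ra.getD k "").toList 0)).filter
        (fun t => !decide (t ∈ pvFrom rb 1)) =
      pvTag ((k : Int) + 1)
        ((pvRunsP (ra.getD k "").toList 0).filter
          (fun p => !decide (p ∈ pvRunsP (rb.getD k "").toList 0))) := by
    intro k
    unfold pvTag
    rw [List.filter_map]
    have h1 : (1 : Int) + (k : Int) = (k : Int) + 1 := by ring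
    rw [h1]
    congr 1
    apply List.filter_congr
    intro p _
    simp only [Function.comp]
    congr 1
    have := pvMem_from rb k (p.1, p.2, (k : Int) + 1) rfl
    simp only [this]
  have hmain : (List.range ra.length).flatMap (fun (k : Nat) =>
      (pvTag (1 + (k : Int)) (pvRunsP (ra.getD k "").toList 0)).filter
        (fun t => !decide (t ∈ pvFrom rb 1))) =
      (List.range ra.length).flatMap (fun (k : Nat) =>
        pvTag ((k : Int) + 1)
          ((pvRunsP (ra.getD k "").toList 0).filter
            (fun p => !decide (p ∈ pvRunsP (rb.getD k "").toList 0)))) :=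
    pvFlatMap_congr _ _ _ (fun k _ => hblk k)
  rw [hmain]
  -- extend the range from ra.length to n: extra blocks are empty
  obtain ⟨m, rfl⟩ : ∃ m, n = ra.length + m := ⟨n - ra.length, by omega⟩
  rw [List.range_add, List.flatMap_append, List.flatMap_map]
  have : ((List.range m).flatMap fun k =>
      pvTag (((ra.length + k : Nat) : Int) + 1)
        ((pvRunsP (ra.getD (ra.length + k) "").toList 0).filter
          (fun p => !decide (p ∈ pvRunsP (rb.getD (ra.length + k) "").toList 0)))) = [] := by
    apply List.flatMap_eq_nil_iff.mpr
    intro k _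
    have : ra.getD (ra.length + k) "" = "" := List.getD_eq_default _ _ (by omega)
    rw [this]
    simp [pvRunsP, pvTag]
  simp only [Function.comp] at this ⊢
  rw [this, List.append_nil]

-- per-row: filter difference of the runs = component of the two-pointer merge
lemma pvRow_add (ra rb : List String) (k : Nat) :
    pvTag ((k : Int) + 1)
      ((pvRunsP (rb.getD k "").toList 0).filter
        (fun p => !decide (p ∈ pvRunsP (ra.getD k "").toList 0))) = pvGAdd ra rb k := by
  unfold pvGAdd
  split_ifs with h
  · rw [h]
    have : ∀ (l : List (Int × Int)), l.filter (fun p => !decide (p ∈ l)) = [] := by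
      intro l
      apply List.filter_eq_nil_iff.mpr
      intro p hp
      simp [hp]
    rw [this]
    simp [pvTag]
  · rw [pvAltRuns_eq, pvAltRuns_eq,
      pvMerge_filter _ _ (pvRuns_lt _) (pvRuns_lt _)]

lemma pvRow_rem (ra rb : List String) (k : Nat) :
    pvTag ((k : Int) + 1)
      ((pvRunsP (ra.getD k "").toList 0).filter
        (fun p => !decide (p ∈ pvRunsP (rb.getD k "").toList 0))) = pvGRem ra rb k := by
  unfold pvGRem
  split_ifs with h
  · rw [h]
    have : ∀ (l : List (Int × Int)), l.filter (fun p => !decide (p ∈ l)) = [] := by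
      intro l
      apply List.filter_eq_nil_iff.mpr
      intro p hp
      simp [hp]
    rw [this]
    simp [pvTag]
  · rw [pvAltRuns_eq, pvAltRuns_eq,
      pvMerge_filter _ _ (pvRuns_lt _) (pvRuns_lt _)]

-- ===== VERDICT (by name: the statement is the Claim_ definition above) =====
theorem huligani_spec : Claim_equal_huligani := by
  intro prej potem _
  unfold Spec_huligani
  show huligani prej potem = huligani_alt prej potem
  have hA : huligani prej potem =
      ((pvFrom potem 1).filter (fun t => !decide (t ∈ pvFrom prej 1)),
       (pvFrom prej 1).filter (fun t => !decide (t ∈ pvFrom potem 1))) := by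
    simp only [huligani, izboljsave, pvZemljevid]
    have h1 := pvFoldl_skip_if (fun t => decide (t ∈ pvFrom prej 1)) (pvFrom potem 1) []
    have h2 := pvFoldl_skip_if (fun t => decide (t ∈ pvFrom potem 1)) (pvFrom prej 1) []
    simp only [decide_eq_true_eq] at h1 h2
    rw [h1, h2]
    simp only [List.nil_append]
    rw [pvSorted2_eq_self _ (((pvFrom_pairwise potem 1).1).filter _)]
    rw [pvSorted2_eq_self _ (((pvFrom_pairwise potem 1).1).filter _),
        pvSorted2_eq_self _ (((pvFrom_pairwise prej 1).1).filter _)]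
  rw [hA, pvAlt_flatMap]
  simp only [Prod.mk.injEq]
  constructor
  · rw [pvSide potem prej (max prej.length potem.length) (by omega)]
    exact pvFlatMap_congr _ _ _ (fun k _ => pvRow_add prej potem k)
  · rw [pvSide prej potem (max prej.length potem.length) (by omega)]
    exact pvFlatMap_congr _ _ _ (fun k _ => pvRow_rem prej potem k)
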